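-- pv_equiv track=rewrite | github.com/xuanxuan205/Crackingthecompressedpackagepasswordtool | cracker/zip_cracker.py | generate_mask_passwords
-- ===== SOURCE A (Python) =====
-- import itertools
-- import string
--
-- def generate_mask_passwords(mask):
--     """
--     根据掩码生成密码。
--     掩码示例: ?l?l?d?d?d
--     ?l: 小写字母
--     ?u: 大写字母
--     ?d: 数字
--     ?s: 特殊字符
--     ?a: 所有字符 (小写、大写、数字、特殊)
--     """
--     charsets = {
--         '?l': string.ascii_lowercase,
--         '?u': string.ascii_uppercase,
--         '?d': string.digits,
--         '?s': string.punctuation,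
--         '?a': string.ascii_letters + string.digits + string.punctuation
--     }
--
--     # 解析掩码，将掩码中的特殊序列替换为对应的字符集
--     parsed_mask_components = []
--     i = 0
--     while i < len(mask):
--         if mask[i] == '?' and i + 1 < len(mask):
--             char_code = mask[i:i+2]
--             if char_code in charsets:
--                 parsed_mask_components.append(charsets[char_code])
--                 i += 2
--             else:
--                 # 如果是未知掩码字符，按原样处理
--                 parsed_mask_components.append(mask[i])
--                 i += 1
--         else:
--             parsed_mask_components.append(mask[i])
--             i += 1
--
--     # 生成所有可能的组合
--     for combination in itertools.product(*parsed_mask_components):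
--         yield "".join(combination)
-- ===== SOURCE B (Python) =====
-- import string
--
-- def generate_mask_passwords(mask):
--     """Parse with a pending-'?' flag, then enumerate by RANK: password #n is
--     decoded from the integer n in mixed radix (rightmost component fastest),
--     so no Cartesian-product structure is ever built."""
--     charsets = {
--         '?l': string.ascii_lowercase,
--         '?u': string.ascii_uppercase,
--         '?d': string.digits,
--         '?s': string.punctuation,
--         '?a': string.ascii_letters + string.digits + string.punctuation
--     }
--
--     components = []
--     pending = False  # an unresolved '?' seen just before
--     for ch in mask:
--         if pending:
--             pending = False
--             key = '?' + ch
--             if key in charsets: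
--                 components.append(charsets[key])
--                 continue
--             components.append('?')
--         if ch == '?':
--             pending = True
--         else:
--             components.append(ch)
--     if pending:
--         components.append('?')
--
--     total = 1
--     for comp in components:
--         total *= len(comp)
--
--     for n in range(total):
--         chars = []
--         for comp in reversed(components):
--             n, r = divmod(n, len(comp))
--             chars.append(comp[r])
--         yield ''.join(reversed(chars))
-- ===== Notes on version B (the rewrite author's own statement) =====
-- stated objective: alternative
-- what changed: Replaced the index/slice parsing loop plus itertools.product with a pending-flag tokenizer and rank decoding: the total count is the product of component sizes and password #n is decoded from the integer n in mixed radix (rightmost component fastest), so no Cartesian-product structure is built at all.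
import Mathlib
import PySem

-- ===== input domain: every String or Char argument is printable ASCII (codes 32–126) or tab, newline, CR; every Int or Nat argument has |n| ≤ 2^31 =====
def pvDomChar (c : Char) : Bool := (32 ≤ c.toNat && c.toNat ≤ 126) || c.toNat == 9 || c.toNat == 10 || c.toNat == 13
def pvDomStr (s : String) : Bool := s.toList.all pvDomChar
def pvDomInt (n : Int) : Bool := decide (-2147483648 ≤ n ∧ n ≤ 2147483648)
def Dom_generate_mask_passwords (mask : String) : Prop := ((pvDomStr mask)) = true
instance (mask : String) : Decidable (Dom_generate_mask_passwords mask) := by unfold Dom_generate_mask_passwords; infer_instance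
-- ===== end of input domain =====

-- B replaces A's index/slice parsing loop with a one-pass pending-flag tokenizer and
-- replaces itertools.product with rank decoding: password #n is decoded from the
-- integer n in mixed radix, no product structure is built (objective: alternative).

-- ===== PORT A =====
-- The charset table of A's `charsets` dict, keys and values as character lists.
def pvCharsets : List (List Char × List Char) :=
  [ (['?','l'], "abcdefghijklmnopqrstuvwxyz".toList),
    (['?','u'], "ABCDEFGHIJKLMNOPQRSTUVWXYZ".toList),
    (['?','d'], "0123456789".toList),
    (['?','s'], "!\"#$%&'()*+,-./:;<=>?@[\\]^_`{|}~".toList),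
    (['?','a'], ("abcdefghijklmnopqrstuvwxyzABCDEFGHIJKLMNOPQRSTUVWXYZ0123456789!\"#$%&'()*+,-./:;<=>?@[\\]^_`{|}~").toList) ]

-- A's while loop over index i: consume two chars for a known '?x' code, else one literal char.
def pvParseA : List Char → List (List Char)
  | [] => []
  | c :: rest =>
    match rest with
    | [] => [c] :: pvParseA []
    | d :: rest' =>
      if c = '?' then
        match pvCharsets.lookup [c, d] with
        | some comp => comp :: pvParseA rest'
        | none => [c] :: pvParseA (d :: rest')
      else [c] :: pvParseA (d :: rest')

-- itertools.product over the parsed pools, rendered by its semantics: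
-- the leftmost pool varies slowest, each tuple is one choice per pool.
def pvProdA : List (List Char) → List (List Char)
  | [] => [[]]
  | p :: ps => p.flatMap (fun y => (pvProdA ps).map (fun t => y :: t))

def generate_mask_passwords (mask : String) : List String :=
  (pvProdA (pvParseA mask.toList)).map String.mk

-- ===== PORT B =====
-- One iteration of B's tokenizer for-loop: state = (components so far, pending '?').
def pvStepB (st : List (List Char) × Bool) (ch : Char) : List (List Char) × Bool :=
  let comps := if st.2 then
      match pvCharsets.lookup ['?', ch] with
      | some _ => none
      | none => some (st.1 ++ [['?']])
    else some st.1
  match comps, pvCharsets.lookup ['?', ch], st.2 with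
  | none, some cs, _ => (st.1 ++ [cs], false)
  | _, _, _ =>
    let base := match comps with | some l => l | none => st.1
    if ch = '?' then (base, true) else (base ++ [[ch]], false)

-- After the tokenizer loop: a trailing pending '?' becomes a literal component.
def pvFinishB (st : List (List Char) × Bool) : List (List Char) :=
  if st.2 then st.1 ++ [['?']] else st.1

-- B's inner decoding loop over reversed(components): state = (n, chars);
-- comp[r] is List.getD (exact here: r = n % len is always in range when the
-- loop runs, since range(total) is empty unless every component is nonempty).
def pvDecodeB (comps : List (List Char)) (n0 : Nat) : List Char :=
  (comps.reverse.foldl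
      (fun (st : Nat × List Char) comp =>
        (st.1 / comp.length, st.2 ++ [comp.getD (st.1 % comp.length) ' ']))
      (n0, [])).2.reverse

def generate_mask_passwords_alt (mask : String) : List String :=
  let comps := pvFinishB (mask.toList.foldl pvStepB ([], false))
  let total := comps.foldl (fun t comp => t * comp.length) 1
  (List.range total).map (fun n => String.mk (pvDecodeB comps n))

-- ===== PRECONDITION & SPEC =====
def Spec_generate_mask_passwords (mask : String) (out : List String) : Prop := out = generate_mask_passwords_alt mask
instance (mask : String) (out : List String) : Decidable (Spec_generate_mask_passwords mask out) := by unfold Spec_generate_mask_passwords; infer_instance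

-- ===== CLAIM (what is proved, stated in full; the proofs are below) =====
def Claim_equal_generate_mask_passwords : Prop := ∀ (mask : String), Dom_generate_mask_passwords mask → Spec_generate_mask_passwords mask (generate_mask_passwords mask)

-- ===== LEMMAS AND PROOFS =====

-- B's pending-flag tokenizer produces exactly A's parsed components
-- (a pending flag stands for an unconsumed leading '?').
theorem pvStepB_parse (cs : List Char) :
    ∀ (comps : List (List Char)) (pending : Bool),
      pvFinishB (cs.foldl pvStepB (comps, pending))
        = comps ++ pvParseA (if pending then '?' :: cs else cs) := by
  induction cs with
  | nil =>
    intro comps pending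
    cases pending <;> simp [pvFinishB, pvParseA]
  | cons ch rest ih =>
    intro comps pending
    cases pending with
    | false =>
      by_cases hq : ch = '?'
      · subst hq
        have h1 : pvStepB (comps, false) '?' = (comps, true) := by simp [pvStepB]
        rw [if_neg (by simp), List.foldl_cons, h1, ih]
        simp
      · have h1 : pvStepB (comps, false) ch = (comps ++ [[ch]], false) := by
          simp [pvStepB, hq]
        rw [if_neg (by simp), List.foldl_cons, h1, ih]
        cases rest <;> simp [pvParseA, hq]
    | true =>
      rw [if_pos rfl, List.foldl_cons]
      cases hlk : pvCharsets.lookup ['?', ch] with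
      | some v =>
        have h1 : pvStepB (comps, true) ch = (comps ++ [v], false) := by
          simp [pvStepB, hlk]
        rw [h1, ih]
        simp [pvParseA, hlk]
      | none =>
        by_cases hq : ch = '?'
        · subst hq
          have h1 : pvStepB (comps, true) '?' = (comps ++ [['?']], true) := by
            simp [pvStepB, hlk]
          rw [h1, ih]
          simp [pvParseA, hlk]
        · have h1 : pvStepB (comps, true) ch = (comps ++ [['?'], [ch]], false) := by
            simp [pvStepB, hlk, hq]
          rw [h1, ih]
          have h2 : pvParseA ('?' :: ch :: rest) = ['?'] :: pvParseA (ch :: rest) := by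
            simp [pvParseA, hlk]
          rw [h2]
          cases rest <;> simp [pvParseA, hq]

-- Product of the component lengths (the mixed radix's total).
def pvT : List (List Char) → Nat
  | [] => 1
  | p :: ps => p.length * pvT ps

theorem pvT_foldl (comps : List (List Char)) :
    ∀ a : Nat, comps.foldl (fun t comp => t * comp.length) a = a * pvT comps := by
  induction comps with
  | nil => intro a; simp [pvT]
  | cons p ps ih => intro a; simp [pvT, ih, Nat.mul_assoc, Nat.mul_comm p.length]

theorem pvT_append (l1 l2 : List (List Char)) : pvT (l1 ++ l2) = pvT l1 * pvT l2 := by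
  induction l1 with
  | nil => simp [pvT]
  | cons p ps ih => simp [pvT, ih, Nat.mul_assoc]

theorem pvT_reverse (l : List (List Char)) : pvT l.reverse = pvT l := by
  induction l with
  | nil => rfl
  | cons p ps ih => simp [pvT, pvT_append, ih, Nat.mul_comm]

-- The decoding loop, written as left-to-right recursion over the (reversed) list.
def pvDecSeq : List (List Char) → Nat → List Char
  | [], _ => []
  | c :: rest, n => c.getD (n % c.length) ' ' :: pvDecSeq rest (n / c.length)

theorem pvDecodeB_foldl (l : List (List Char)) :
    ∀ (n : Nat) (acc : List Char),
      (l.foldl (fun (st : Nat × List Char) comp =>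
          (st.1 / comp.length, st.2 ++ [comp.getD (st.1 % comp.length) ' ']))
        (n, acc)).2 = acc ++ pvDecSeq l n := by
  induction l with
  | nil => intro n acc; simp [pvDecSeq]
  | cons c rest ih =>
    intro n acc
    rw [List.foldl_cons, ih, pvDecSeq]
    simp

theorem pvDecSeq_append (l1 l2 : List (List Char)) :
    ∀ n : Nat, pvDecSeq (l1 ++ l2) n = pvDecSeq l1 n ++ pvDecSeq l2 (n / pvT l1) := by
  induction l1 with
  | nil => intro n; simp [pvDecSeq, pvT]
  | cons c rest ih =>
    intro n
    simp [pvDecSeq, ih, pvT, Nat.div_div_eq_div_mul]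

-- The rank decoder in natural left-to-right (leftmost component slowest) form.
def pvDec : List (List Char) → Nat → List Char
  | [], _ => []
  | p :: ps, n => p.getD (n / pvT ps % p.length) ' ' :: pvDec ps n

theorem pvDecodeB_eq_pvDec (comps : List (List Char)) (n : Nat) :
    pvDecodeB comps n = pvDec comps n := by
  induction comps generalizing n with
  | nil => simp [pvDecodeB, pvDec]
  | cons p ps ih =>
    have h := ih n
    simp only [pvDecodeB, pvDecodeB_foldl, List.nil_append] at h ⊢
    rw [List.reverse_cons, pvDecSeq_append, pvT_reverse]
    simp [pvDecSeq, pvDec, h]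

-- pvDec only depends on the rank modulo the total.
theorem pvDec_mod (ps : List (List Char)) : ∀ n : Nat, pvDec ps n = pvDec ps (n % pvT ps) := by
  induction ps with
  | nil => intro n; simp [pvDec]
  | cons q qs ih =>
    intro n
    simp only [pvDec, pvT]
    have h1 : n % (q.length * pvT qs) / pvT qs % q.length = n / pvT qs % q.length := by
      rw [Nat.mul_comm, Nat.mod_mul_right_div_self, Nat.mod_mod]
    have h2 : pvDec qs (n % (q.length * pvT qs)) = pvDec qs n := by
      rw [ih (n % (q.length * pvT qs)),
        Nat.mod_mod_of_dvd n (dvd_mul_left (pvT qs) q.length), ← ih n]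
    rw [h1, h2]

-- range of a product, split into blocks (leftmost factor varies slowest).
theorem pvRange_mul (a b : Nat) :
    List.range (a * b) = (List.range a).flatMap (fun q => (List.range b).map (fun r => q * b + r)) := by
  induction a with
  | zero => simp
  | succ a ih =>
    rw [Nat.succ_mul, List.range_add, ih, List.range_succ, List.flatMap_append]
    simp [Nat.add_comm]

theorem pvMap_getD_range (l : List Char) (d : Char) :
    (List.range l.length).map (fun i => l.getD i d) = l := by
  apply List.ext_getElem
  · simp
  · intro i h1 h2
    simp [List.getD_eq_getElem?_getD, List.getElem?_eq_getElem h2]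

-- Rank decoding of 0..total-1 enumerates exactly itertools.product's sequence.
theorem pvDec_range (comps : List (List Char)) :
    (List.range (pvT comps)).map (pvDec comps) = pvProdA comps := by
  induction comps with
  | nil => simp [pvT, pvDec, pvProdA]
  | cons p ps ih =>
    rw [pvT, pvRange_mul, List.map_flatMap, pvProdA]
    conv_rhs => rw [← pvMap_getD_range p ' ', List.flatMap_map]
    refine List.flatMap_congr ?_
    intro q hq
    rw [List.mem_range] at hq
    rw [List.map_map, ← ih, List.map_map]
    refine List.map_congr_left ?_
    intro r hr
    rw [List.mem_range] at hr
    have hT : 0 < pvT ps := Nat.zero_lt_of_lt hr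
    simp only [Function.comp_apply, pvDec]
    have hidx : (q * pvT ps + r) / pvT ps % p.length = q := by
      rw [Nat.mul_comm q, Nat.mul_add_div hT, Nat.div_eq_of_lt hr, Nat.add_zero,
        Nat.mod_eq_of_lt hq]
    have htail : pvDec ps (q * pvT ps + r) = pvDec ps r := by
      have hm : (q * pvT ps + r) % pvT ps = r := by
        rw [Nat.mul_comm, Nat.mul_add_mod, Nat.mod_eq_of_lt hr]
      rw [pvDec_mod ps (q * pvT ps + r), hm]
    rw [hidx, htail]

-- ===== VERDICT (by name: the statement is the Claim_ definition above) =====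
theorem generate_mask_passwords_spec : Claim_equal_generate_mask_passwords := by
  intro mask _
  unfold Spec_generate_mask_passwords generate_mask_passwords generate_mask_passwords_alt
  simp only [pvStepB_parse, Bool.false_eq_true, if_false, List.nil_append, pvT_foldl,
    Nat.one_mul, pvDecodeB_eq_pvDec]
  rw [← pvDec_range, List.map_map]
  rfl
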